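-- pv_equiv track=rewrite | github.com/ferrocene/ferrocene | exts/ferrocene_spec/syntax_directive.py | is_syntax_identifier
-- ===== SOURCE A (Python) =====
-- def is_syntax_identifier(identifier):
--     EXPECT_ANY = 0
--     EXPECT_UPPER = 1
--     EXPECT_LOWER = 2
--
--     # Some of the identifier referring to Unicode categories are called
--     # XID_Category. The problem is that the XID_ portion is not a valid
--     # identifier based on our rules. This code special-case that by ignoring
--     # the problematic part of the identifier.
--     if identifier.startswith("XID_"):
--         identifier = identifier[len("XID_") :]
--
--     expected = EXPECT_UPPER
--     for char in identifier:
--         if expected == EXPECT_UPPER: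
--             if not char.isupper():
--                 return False
--             expected = EXPECT_LOWER
--         elif expected == EXPECT_LOWER:
--             if char.isupper():
--                 return False
--             expected = EXPECT_ANY
--
--     return True
-- ===== SOURCE B (Python) =====
-- def is_syntax_identifier(identifier):
--     if identifier.startswith("XID_"):
--         identifier = identifier[len("XID_"):]
--     if len(identifier) >= 1 and not identifier[0].isupper():
--         return False
--     if len(identifier) >= 2 and identifier[1].isupper():
--         return False
--     return True
-- ===== Notes on version B (the rewrite author's own statement) =====
-- stated objective: simpler
-- what changed: Replaced the three-state machine loop over all characters by a loop-free closed-form check of only the first two characters after the XID_ prefix strip (everything later is provably unconstrained).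
import Mathlib
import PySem

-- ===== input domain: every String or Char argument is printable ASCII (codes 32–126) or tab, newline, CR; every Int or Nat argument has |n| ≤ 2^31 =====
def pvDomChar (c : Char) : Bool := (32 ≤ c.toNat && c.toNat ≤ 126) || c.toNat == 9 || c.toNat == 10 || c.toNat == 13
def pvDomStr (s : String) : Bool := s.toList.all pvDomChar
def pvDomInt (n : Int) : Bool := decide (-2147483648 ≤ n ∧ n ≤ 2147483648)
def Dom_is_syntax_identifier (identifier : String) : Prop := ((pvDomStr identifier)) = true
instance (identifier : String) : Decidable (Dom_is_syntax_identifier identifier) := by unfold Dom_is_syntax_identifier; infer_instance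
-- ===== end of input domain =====

-- B replaces A's three-state loop by a loop-free check of the first two characters; objective: simpler.

-- ===== PORT A =====
-- A's for-loop with early return, as structural recursion over the same state
-- (expected: 1 = EXPECT_UPPER, 2 = EXPECT_LOWER, 0 = EXPECT_ANY).
def pvLoopA : List Char → Nat → Bool
  | [], _ => true
  | c :: rest, expected =>
    if expected = 1 then
      if !PySem.Chars.isupper c then false else pvLoopA rest 2
    else if expected = 2 then
      if PySem.Chars.isupper c then false else pvLoopA rest 0
    else pvLoopA rest 0

def is_syntax_identifier (identifier : String) : Bool :=
  let id := if PySem.Str.startswith identifier "XID_" then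
              PySem.Str.slice identifier (some 4) none
            else identifier
  pvLoopA id.toList 1

-- ===== PORT B =====
def is_syntax_identifier_alt (identifier : String) : Bool :=
  let s := if PySem.Str.startswith identifier "XID_" then
             PySem.Str.slice identifier (some 4) none
           else identifier
  let cs := s.toList
  if decide (1 ≤ cs.length) && !PySem.Chars.isupper (cs.getD 0 ' ') then false
  else if decide (2 ≤ cs.length) && PySem.Chars.isupper (cs.getD 1 ' ') then false
  else true

-- ===== PRECONDITION & SPEC =====
def Spec_is_syntax_identifier (identifier : String) (out : Bool) : Prop := out = is_syntax_identifier_alt identifier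
instance (identifier : String) (out : Bool) : Decidable (Spec_is_syntax_identifier identifier out) := by unfold Spec_is_syntax_identifier; infer_instance

-- ===== CLAIM (what is proved, stated in full; the proofs are below) =====
def Claim_equal_is_syntax_identifier : Prop := ∀ (identifier : String), Dom_is_syntax_identifier identifier → Spec_is_syntax_identifier identifier (is_syntax_identifier identifier)

-- ===== LEMMAS AND PROOFS =====
theorem pvLoopA_zero (l : List Char) : pvLoopA l 0 = true := by
  induction l with
  | nil => rfl
  | cons c rest ih => simp [pvLoopA, ih]

theorem pvLoopA_eq_alt (cs : List Char) :
    pvLoopA cs 1 =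
      (if decide (1 ≤ cs.length) && !PySem.Chars.isupper (cs.getD 0 ' ') then false
       else if decide (2 ≤ cs.length) && PySem.Chars.isupper (cs.getD 1 ' ') then false
       else true) := by
  match cs with
  | [] => rfl
  | [c] => simp [pvLoopA]
  | c :: d :: rest => simp [pvLoopA, pvLoopA_zero]

-- ===== VERDICT (by name: the statement is the Claim_ definition above) =====
theorem is_syntax_identifier_spec : Claim_equal_is_syntax_identifier := by
  intro identifier _
  unfold Spec_is_syntax_identifier is_syntax_identifier is_syntax_identifier_alt
  exact pvLoopA_eq_alt _
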